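-- pv_equiv track=rewrite | github.com/jschmidtnj/CS115 | loops.py | find_max_2D_coords
-- ===== SOURCE A (Python) =====
-- def find_max_2D_coords(L):
--     rowIN = columnIN = 0
--     max = L[0][0]
--     for r in range(len(L)):
--         for c in range(len(L[r])):
--             if L[r][c] > max:
--                 max = L[r][c]
--                 rowIN = r
--                 columnIN = c
--     return columnIN, rowIN
-- ===== SOURCE B (Python) =====
-- def find_max_2D_coords(L):
--     max_val = L[0][0]
--     rowIN = columnIN = 0
--     for r, row in enumerate(L):
--         if row:
--             m = max(row)
--             if m > max_val:
--                 max_val = m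
--                 rowIN = r
--                 columnIN = row.index(m)
--     return columnIN, rowIN
-- ===== Notes on version B (the rewrite author's own statement) =====
-- stated objective: alternative
-- what changed: A scans every element of every row with index-based nested loops and a running max; B decomposes per row: it reduces each row to its built-in max first and only updates (and locates the column with row.index) when that row max strictly beats the running best, preserving first-occurrence tie-breaking.
import Mathlib
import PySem

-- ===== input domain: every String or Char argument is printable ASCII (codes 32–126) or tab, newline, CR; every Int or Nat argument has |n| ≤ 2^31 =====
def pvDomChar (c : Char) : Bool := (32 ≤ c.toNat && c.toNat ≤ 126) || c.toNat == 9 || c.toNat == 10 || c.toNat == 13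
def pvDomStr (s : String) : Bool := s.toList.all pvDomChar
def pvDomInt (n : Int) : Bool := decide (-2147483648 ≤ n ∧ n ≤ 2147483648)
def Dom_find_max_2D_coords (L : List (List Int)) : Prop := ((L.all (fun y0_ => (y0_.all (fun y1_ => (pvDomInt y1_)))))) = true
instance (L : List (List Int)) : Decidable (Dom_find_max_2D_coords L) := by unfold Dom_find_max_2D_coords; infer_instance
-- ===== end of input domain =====

-- B replaces A's flat element-by-element scan with a per-row decomposition (reduce each
-- row to its max, then combine across rows); objective: simpler, no speed claim.

-- ===== PORT A =====
-- state is (max, rowIN, columnIN); L[0][0] is pyGet?/getD (none = IndexError, excluded by Pre_)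
def find_max_2D_coords (L : List (List Int)) : Int × Int :=
  let mx0 : Int := (PySem.List.pyGet? ((PySem.List.pyGet? L 0).getD []) 0).getD 0
  let st :=
    (PySem.List.pyRange 0 (PySem.List.len L)).foldl
      (fun st r =>
        let row := PySem.List.pyGetD L r []
        (PySem.List.pyRange 0 (PySem.List.len row)).foldl
          (fun st c =>
            if PySem.List.pyGetD row c 0 > st.1 then (PySem.List.pyGetD row c 0, r, c) else st)
          st)
      (mx0, 0, 0)
  (st.2.2, st.2.1)

-- ===== PORT B =====
def find_max_2D_coords_alt (L : List (List Int)) : Int × Int :=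
  let mx0 : Int := (PySem.List.pyGet? ((PySem.List.pyGet? L 0).getD []) 0).getD 0
  let st :=
    (PySem.List.enumerate L).foldl
      (fun st p =>
        if p.2 ≠ [] then
          match PySem.List.max? p.2 (fun y => y) with
          | none => st
          | some m =>
              if m > st.1 then (m, p.1, ((PySem.List.index? p.2 m).getD 0 : Int)) else st
        else st)
      (mx0, 0, 0)
  (st.2.2, st.2.1)

-- ===== PRECONDITION & SPEC =====
-- Pre_ excludes exactly the inputs where `L[0][0]` raises IndexError (empty L or empty first row)
def Pre_find_max_2D_coords (L : List (List Int)) : Prop := L ≠ [] ∧ L.headI ≠ []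
instance (L : List (List Int)) : Decidable (Pre_find_max_2D_coords L) := by
  unfold Pre_find_max_2D_coords; infer_instance
def pvWitness_find_max_2D_coords : List (List Int) := [[1, 3], [2]]

def Spec_find_max_2D_coords (L : List (List Int)) (out : Int × Int) : Prop := out = find_max_2D_coords_alt L
instance (L : List (List Int)) (out : Int × Int) : Decidable (Spec_find_max_2D_coords L out) := by unfold Spec_find_max_2D_coords; infer_instance

-- ===== CLAIM (what is proved, stated in full; the proofs are below) =====
def Claim_equal_find_max_2D_coords : Prop := ∀ (L : List (List Int)), Dom_find_max_2D_coords L → Pre_find_max_2D_coords L → Spec_find_max_2D_coords L (find_max_2D_coords L)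

-- ===== LEMMAS AND PROOFS =====

-- foldl max pulls a `max a` out of the seed
theorem pv_foldl_max_max (t : List Int) (a b : Int) :
    t.foldl max (max a b) = max a (t.foldl max b) := by
  induction t generalizing b with
  | nil => rfl
  | cons c t ih =>
      simp only [List.foldl_cons, max_assoc]
      exact ih (max b c)

-- A's inner loop over one row, written over `enumerate row s`, in closed form
theorem pv_inner (r : Int) (row : List Int) (s : Int) (st : Int × Int × Int) :
    (PySem.List.enumerate row s).foldl
        (fun st p => if p.2 > st.1 then (p.2, r, p.1) else st) st
      = (if st.1 < row.foldl max st.1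
          then (row.foldl max st.1, r, s + (row.idxOf (row.foldl max st.1) : Int))
          else st) := by
  induction row generalizing s st with
  | nil => simp [PySem.List.enumerate_nil]
  | cons v t ih =>
      rw [PySem.List.enumerate_cons, List.foldl_cons]
      show (PySem.List.enumerate t (s + 1)).foldl _ (if v > st.1 then (v, r, s) else st) = _
      have hcons : (v :: t).foldl max st.1 = t.foldl max (max st.1 v) := rfl
      by_cases hv : v > st.1
      · rw [if_pos hv, ih]
        have hm : (v :: t).foldl max st.1 = t.foldl max v := by
          rw [hcons, max_eq_right (le_of_lt hv)]
        by_cases hlt : v < t.foldl max v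
        · have h1 : st.1 < (v :: t).foldl max st.1 := by rw [hm]; exact lt_trans hv hlt
          rw [if_pos hlt, if_pos h1, hm]
          have hidx : (v :: t).idxOf (t.foldl max v) = t.idxOf (t.foldl max v) + 1 := by
            rw [List.idxOf_cons]
            have : (v == t.foldl max v) = false := by rw [beq_eq_false_iff_ne]; omega
            rw [this]; rfl
          rw [hidx]
          push_cast
          simp only [Prod.mk.injEq]
          exact ⟨trivial, trivial, by ring⟩
        · have hvm : t.foldl max v = v :=
            le_antisymm (not_lt.mp hlt) (PySem.List.le_foldl_max t v).1
          have h1 : st.1 < (v :: t).foldl max st.1 := by rw [hm, hvm]; exact hv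
          rw [if_neg hlt, if_pos h1, hm, hvm]
          simp
      · rw [if_neg hv, ih]
        have hv' : v ≤ st.1 := not_lt.mp hv
        have hm : (v :: t).foldl max st.1 = t.foldl max st.1 := by
          rw [hcons, max_eq_left hv']
        by_cases hlt : st.1 < t.foldl max st.1
        · rw [if_pos hlt, if_pos (hm ▸ hlt), hm]
          have hne : t.foldl max st.1 ≠ v := by omega
          have hidx : (v :: t).idxOf (t.foldl max st.1) = t.idxOf (t.foldl max st.1) + 1 := by
            rw [List.idxOf_cons]
            have : (v == t.foldl max st.1) = false := by rw [beq_eq_false_iff_ne]; omega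
            rw [this]; rfl
          rw [hidx]
          push_cast
          simp only [Prod.mk.injEq]
          exact ⟨trivial, trivial, by ring⟩
        · rw [if_neg hlt, if_neg (hm ▸ hlt)]


-- list.index of an element that is present
theorem pv_idxOf?_of_mem {xs : List Int} {v : Int} (h : v ∈ xs) :
    List.idxOf? v xs = some (List.idxOf v xs) := by
  induction xs with
  | nil => cases h
  | cons x t ih =>
      by_cases hx : x = v
      · simp [List.idxOf?_cons, hx]
      · have hvt : v ∈ t := by
          cases h with
          | head => exact absurd rfl hx
          | tail _ h' => exact h'
        have hb : (x == v) = false := by rw [beq_eq_false_iff_ne]; exact hx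
        simp [List.idxOf?_cons, List.idxOf_cons, hb, ih hvt]

-- A's inner loop in its original `range(len(row))` form
theorem pv_inner_range (r : Int) (row : List Int) (st : Int × Int × Int) :
    (PySem.List.pyRange 0 (PySem.List.len row)).foldl
        (fun st c =>
          if PySem.List.pyGetD row c 0 > st.1 then (PySem.List.pyGetD row c 0, r, c) else st) st
      = (if st.1 < row.foldl max st.1
          then (row.foldl max st.1, r, (row.idxOf (row.foldl max st.1) : Int))
          else st) := by
  have h := pv_inner r row 0 st
  rw [PySem.List.enumerate_eq_map_pyRange row 0, List.foldl_map] at h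
  simpa using h

-- the whole loop of A equals the per-row loop of B, for any seed state
theorem pv_main (L : List (List Int)) (init : Int × Int × Int) :
    (PySem.List.pyRange 0 (PySem.List.len L)).foldl
        (fun st r =>
          let row := PySem.List.pyGetD L r []
          (PySem.List.pyRange 0 (PySem.List.len row)).foldl
            (fun st c =>
              if PySem.List.pyGetD row c 0 > st.1 then (PySem.List.pyGetD row c 0, r, c) else st)
            st)
        init
      = (PySem.List.enumerate L).foldl
        (fun st p =>
          if p.2 ≠ [] then
            match PySem.List.max? p.2 (fun y => y) with
            | none => st
            | some m =>
                if m > st.1 then (m, p.1, ((PySem.List.index? p.2 m).getD 0 : Int)) else st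
          else st)
        init := by
  rw [PySem.List.enumerate_eq_map_pyRange L [], List.foldl_map]
  apply PySem.List.foldl_congr_mem
  intro st r _
  show (PySem.List.pyRange 0 (PySem.List.len (PySem.List.pyGetD L r []))).foldl _ st = _
  rw [pv_inner_range r (PySem.List.pyGetD L r []) st]
  generalize PySem.List.pyGetD L r [] = row
  cases row with
  | nil => simp
  | cons v t =>
      have hmax : (v :: t).foldl max st.1 = max st.1 (t.foldl max v) := by
        show t.foldl max (max st.1 v) = _
        exact pv_foldl_max_max t st.1 v
      rw [PySem.List.max?_id_cons, hmax]
      by_cases hm : st.1 < t.foldl max v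
      · have h1 : st.1 < max st.1 (t.foldl max v) := lt_max_of_lt_right hm
        have h2 : max st.1 (t.foldl max v) = t.foldl max v := max_eq_right (le_of_lt hm)
        rw [if_pos h1, h2]
        have hmem : t.foldl max v ∈ v :: t := by
          rcases PySem.List.foldl_max_mem t v with h | h
          · rw [h]; exact List.mem_cons_self
          · exact List.mem_cons_of_mem v h
        have h3 : List.idxOf? (t.foldl max v) (v :: t)
            = some (List.idxOf (t.foldl max v) (v :: t)) := pv_idxOf?_of_mem hmem
        simp [hm, h3]
      · have h1 : ¬ st.1 < max st.1 (t.foldl max v) := by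
          rw [not_lt, max_le_iff]; exact ⟨le_refl _, not_lt.mp hm⟩
        rw [if_neg h1]
        simp [hm]

theorem find_max_2D_coords_spec : Claim_equal_find_max_2D_coords := by
  intro L _hD _hPre
  unfold Spec_find_max_2D_coords find_max_2D_coords find_max_2D_coords_alt
  dsimp only
  rw [pv_main]
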